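-- pv_equiv track=rewrite | github.com/MCCHRISmaster/Slack-summarizer | incident_summary.py | last_incident
-- ===== SOURCE A (Python) =====
-- def last_incident(messages):
--     keywords = ["incident resolved", "resolved", "closing incident"]
--     message_lines = [msg for msg in messages.split("\n") if msg.strip()]
--     if not message_lines:
--         return ""
--
--     # Find indices of all resolved messages
--     resolved_indices = [
--         i for i, msg in enumerate(message_lines)
--         if any(keyword in msg.lower() for keyword in keywords)
--     ]
--
--     if not resolved_indices:
--         return "Incident not resolved yet."
--
--     if len(resolved_indices) == 1:
--         # Only one resolved message, return everything before it
--         return "\n".join(message_lines[:resolved_indices[0]])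
--
--     # Two or more resolved messages, return block between last two (excluding them)
--     start = resolved_indices[-2] + 1
--     end = resolved_indices[-1]
--     return "\n".join(message_lines[start:end])
-- ===== SOURCE B (Python) =====
-- def last_incident(messages):
--     keywords = ["incident resolved", "resolved", "closing incident"]
--     lines = [msg for msg in messages.split("\n") if msg.strip()]
--     if not lines:
--         return ""
--
--     def hit(msg):
--         low = msg.lower()
--         return any(keyword in low for keyword in keywords)
--
--     # Backward scan: only the last two resolved indices matter.
--     last = prev = None
--     for i, msg in reversed(list(enumerate(lines))):
--         if hit(msg):
--             if last is None:
--                 last = i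
--             else:
--                 prev = i
--                 break
--
--     if last is None:
--         return "Incident not resolved yet."
--     if prev is None:
--         return "\n".join(lines[:last])
--     return "\n".join(lines[prev + 1:last])
-- ===== Notes on version B (the rewrite author's own statement) =====
-- stated objective: simpler
-- what changed: Instead of materialising the full list of resolved indices and indexing it from the back, B scans the filtered lines once from the end keeping two scalars (last, prev) and stops at the second hit.
import Mathlib
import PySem

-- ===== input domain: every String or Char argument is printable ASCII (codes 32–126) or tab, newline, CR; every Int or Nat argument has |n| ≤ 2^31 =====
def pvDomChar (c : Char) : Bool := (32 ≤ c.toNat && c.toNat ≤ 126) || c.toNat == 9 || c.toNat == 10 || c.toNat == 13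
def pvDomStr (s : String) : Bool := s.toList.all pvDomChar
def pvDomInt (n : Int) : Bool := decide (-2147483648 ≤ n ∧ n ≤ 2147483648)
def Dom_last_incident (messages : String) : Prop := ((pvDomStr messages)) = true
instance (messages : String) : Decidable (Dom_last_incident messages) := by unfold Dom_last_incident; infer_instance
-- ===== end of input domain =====

-- B scans the filtered lines once from the end with two scalars (last, prev) instead of
-- building the whole list of resolved indices; return values proved identical on all inputs.

-- ===== PORT A =====
-- messages.split("\\n"): sep is the nonempty literal "\\n", so split? is always some and the getD [] default is unreachable
-- any(keyword in msg.lower() for keyword in keywords)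
def pvHitA (msg : String) : Bool :=
  ["incident resolved", "resolved", "closing incident"].any
    (fun k => PySem.Str.isIn k (PySem.Str.lower msg))

def last_incident (messages : String) : String :=
  let lines := ((PySem.Str.split? messages "\n").getD []).filter (fun m => PySem.Str.strip m ≠ "")
  if lines = [] then ""
  else
    let idx := ((PySem.List.enumerate lines).filter (fun p => pvHitA p.2)).map (·.1)
    if idx = [] then "Incident not resolved yet."
    else if idx.length = 1 then
      -- idx[0]; the guard makes idx nonempty, so the pyGetD default 0 is unreachable
      PySem.Str.join "\n" (PySem.List.slice lines none (some (PySem.List.pyGetD idx 0 0)))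
    else
      -- idx[-2], idx[-1]; len(idx) ≥ 2 here, so the defaults are unreachable
      let start := PySem.List.pyGetD idx (-2) 0 + 1
      let stop := PySem.List.pyGetD idx (-1) 0
      PySem.Str.join "\n" (PySem.List.slice lines (some start) (some stop))

-- ===== PORT B =====
def pvHitB (msg : String) : Bool :=
  let low := PySem.Str.lower msg
  ["incident resolved", "resolved", "closing incident"].any (fun k => PySem.Str.isIn k low)

-- the 'for i, msg in reversed(list(enumerate(lines)))' loop with its break:
-- state is the scalar 'last'; returns (last, prev) as the loop leaves them
def pvScanBack : List (Int × String) → Option Int → Option Int × Option Int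
  | [], last => (last, none)
  | (i, msg) :: rest, last =>
    if pvHitB msg then
      match last with
      | none => pvScanBack rest (some i)
      | some l => (some l, some i)      -- break
    else pvScanBack rest last

def last_incident_alt (messages : String) : String :=
  let lines := ((PySem.Str.split? messages "\n").getD []).filter (fun m => PySem.Str.strip m ≠ "")
  if lines = [] then ""
  else
    match pvScanBack ((PySem.List.enumerate lines).reverse) none with
    | (none, _) => "Incident not resolved yet."
    | (some l, none) => PySem.Str.join "\n" (PySem.List.slice lines none (some l))
    | (some l, some p) => PySem.Str.join "\n" (PySem.List.slice lines (some (p + 1)) (some l))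

-- ===== PRECONDITION & SPEC =====
def Spec_last_incident (messages : String) (out : String) : Prop := out = last_incident_alt messages
instance (messages : String) (out : String) : Decidable (Spec_last_incident messages out) := by unfold Spec_last_incident; infer_instance

-- ===== CLAIM (what is proved, stated in full; the proofs are below) =====
def Claim_equal_last_incident : Prop := ∀ (messages : String), Dom_last_incident messages → Spec_last_incident messages (last_incident messages)

-- ===== LEMMAS AND PROOFS =====

theorem pvHit_eq : pvHitA = pvHitB := rfl

-- scan with 'last' already set returns it together with the first further hit
theorem pvScanBack_some (L : List (Int × String)) (a : Int) :
    pvScanBack L (some a) = (some a, ((L.filter (fun p => pvHitB p.2)).map (·.1)).head?) := by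
  induction L with
  | nil => simp [pvScanBack]
  | cons q rest ih =>
    obtain ⟨i, msg⟩ := q
    by_cases h : pvHitB msg = true <;> simp [pvScanBack, h, ih]

-- scan from 'none' returns the first two hits of the traversed list
theorem pvScanBack_none (L : List (Int × String)) :
    pvScanBack L none = (((L.filter (fun p => pvHitB p.2)).map (·.1)).head?,
                         (((L.filter (fun p => pvHitB p.2)).map (·.1)).drop 1).head?) := by
  induction L with
  | nil => simp [pvScanBack]
  | cons q rest ih =>
    obtain ⟨i, msg⟩ := q
    by_cases h : pvHitB msg = true <;> simp [pvScanBack, h, ih, pvScanBack_some]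

-- ===== VERDICT (by name: the statement is the Claim_ definition above) =====
theorem last_incident_spec : Claim_equal_last_incident := by
  intro messages _
  unfold Spec_last_incident last_incident last_incident_alt
  set lines := ((PySem.Str.split? messages "\n").getD []).filter (fun m => PySem.Str.strip m ≠ "") with hl
  by_cases hnil : lines = []
  · simp [hnil]
  · simp only [hnil, if_false]
    rw [pvScanBack_none]
    set idx := ((PySem.List.enumerate lines).filter (fun p => pvHitA p.2)).map (·.1) with hidx
    have hrev : ((((PySem.List.enumerate lines).reverse).filter (fun p => pvHitB p.2)).map (·.1)) = idx.reverse := by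
      rw [hidx, ← pvHit_eq, List.filter_reverse, List.map_reverse]
    rw [hrev]
    rcases hr : idx.reverse with _ | ⟨a, _ | ⟨b, rest⟩⟩
    · have : idx = [] := by simpa using congrArg List.reverse hr
      simp [this]
    · have h1 : idx = [a] := by simpa using congrArg List.reverse hr
      simp [h1, PySem.List.pyGetD_zero_cons]
    · have h2 : idx = rest.reverse ++ [b, a] := by
        have := congrArg List.reverse hr; simpa using this
      have hlen : idx.length = rest.length + 2 := by simp [h2]
      have hne : idx ≠ [] := by simp [h2]
      have hlen1 : ¬ idx.length = 1 := by omega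
      simp only [hne, if_false, hlen1, if_false]
      have hm1 : PySem.List.pyGetD idx (-1) 0 = a := by
        rw [h2, show rest.reverse ++ [b, a] = (rest.reverse ++ [b]) ++ [a] by simp,
            PySem.List.pyGetD_neg_one_append_singleton]
      have hm2 : PySem.List.pyGetD idx (-2) 0 = b := by
        rw [h2, PySem.List.pyGetD_neg_ofNat (rest.reverse ++ [b, a]) 2 0 (by omega) (by simp),
            List.getElem_append_right (by simp)]
        simp
      rw [hm1, hm2]; rfl
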